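-- pv_equiv track=rewrite | github.com/ryb-spec/chumash-question-engine | engine/flow_builder.py | naturalize_subject_action
-- ===== SOURCE A (Python) =====
-- def naturalize_subject_action(action_text, subject_text):
--     replacements = [
--         ("and he ", "and "),
--         ("and it ", "and "),
--         ("he ", ""),
--         ("it ", ""),
--         ("they ", ""),
--         ("and they ", "and "),
--     ]
--     for prefix, replacement in replacements:
--         if action_text.startswith(prefix):
--             return f"{replacement}{subject_text} {action_text[len(prefix):]}"
--     return f"{subject_text} {action_text}"
-- ===== SOURCE B (Python) =====
-- def naturalize_subject_action(action_text, subject_text):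
--     conj = action_text.startswith("and ")
--     body = action_text[4:] if conj else action_text
--     for pronoun in ("he ", "it ", "they "):
--         if body.startswith(pronoun):
--             rest = body[len(pronoun):]
--             if conj:
--                 return f"and {subject_text} {rest}"
--             return f"{subject_text} {rest}"
--     return f"{subject_text} {action_text}"
-- ===== Notes on version B (the rewrite author's own statement) =====
-- stated objective: simpler
-- what changed: B replaces A's six-entry (prefix, replacement) table scan by a single 'and '-conjunction strip followed by a three-pronoun prefix scan on the stripped body.
import Mathlib
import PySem

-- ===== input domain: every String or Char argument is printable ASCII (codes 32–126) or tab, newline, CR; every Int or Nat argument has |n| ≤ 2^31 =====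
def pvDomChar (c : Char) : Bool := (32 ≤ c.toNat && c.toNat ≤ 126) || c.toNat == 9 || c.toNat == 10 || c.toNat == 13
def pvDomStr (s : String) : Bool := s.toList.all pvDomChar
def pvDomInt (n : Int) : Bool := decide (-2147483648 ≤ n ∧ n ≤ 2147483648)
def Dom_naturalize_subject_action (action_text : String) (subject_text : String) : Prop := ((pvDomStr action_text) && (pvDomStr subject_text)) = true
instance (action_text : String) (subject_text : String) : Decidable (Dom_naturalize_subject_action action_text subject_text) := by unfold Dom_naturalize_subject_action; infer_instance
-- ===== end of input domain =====

-- B replaces A's six-entry (prefix, replacement) table scan by one conjunction-strip step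
-- ("and ") followed by a three-pronoun scan; objective: simpler. Equivalence proved for all inputs.

-- ===== PORT A =====
-- the 'for prefix, replacement in replacements' loop, structural recursion over the table
def natA_loop (al sl : List Char) : List (List Char × List Char) → List Char
  | [] => sl ++ ' ' :: al
  | (p, r) :: rest =>
      if PySem.Chars.startswith al p then r ++ sl ++ ' ' :: al.drop p.length
      else natA_loop al sl rest

def naturalize_subject_action (action_text : String) (subject_text : String) : String :=
  String.ofList (natA_loop action_text.toList subject_text.toList
    [("and he ".toList, "and ".toList),
     ("and it ".toList, "and ".toList),
     ("he ".toList, "".toList),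
     ("it ".toList, "".toList),
     ("they ".toList, "".toList),
     ("and they ".toList, "and ".toList)])

-- ===== PORT B =====
-- the 'for pronoun in ("he ", "it ", "they ")' loop of Source B
def natB_loop (conj : Bool) (body al sl : List Char) : List (List Char) → List Char
  | [] => sl ++ ' ' :: al
  | p :: rest =>
      if PySem.Chars.startswith body p then
        if conj then "and ".toList ++ sl ++ ' ' :: body.drop p.length
        else sl ++ ' ' :: body.drop p.length
      else natB_loop conj body al sl rest

def naturalize_subject_action_alt (action_text : String) (subject_text : String) : String :=
  let al := action_text.toList
  let conj := PySem.Chars.startswith al "and ".toList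
  let body := if conj then al.drop 4 else al
  String.ofList (natB_loop conj body al subject_text.toList
    ["he ".toList, "it ".toList, "they ".toList])

-- ===== PRECONDITION & SPEC =====
def Spec_naturalize_subject_action (action_text : String) (subject_text : String) (out : String) : Prop := out = naturalize_subject_action_alt action_text subject_text
instance (action_text : String) (subject_text : String) (out : String) : Decidable (Spec_naturalize_subject_action action_text subject_text out) := by unfold Spec_naturalize_subject_action; infer_instance

-- ===== CLAIM (what is proved, stated in full; the proofs are below) =====
def Claim_equal_naturalize_subject_action : Prop := ∀ (action_text : String) (subject_text : String), Dom_naturalize_subject_action action_text subject_text → Spec_naturalize_subject_action action_text subject_text (naturalize_subject_action action_text subject_text)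

-- ===== LEMMAS AND PROOFS =====

-- startswith against a concatenated pattern splits into two tests
lemma sw_append (x p q : List Char) :
    PySem.Chars.startswith x (p ++ q)
      = (PySem.Chars.startswith x p && PySem.Chars.startswith (x.drop p.length) q) := by
  rw [Bool.eq_iff_iff, Bool.and_eq_true, PySem.Chars.startswith_iff,
      PySem.Chars.startswith_iff, PySem.Chars.startswith_iff]
  constructor
  · rintro ⟨t, rfl⟩
    refine ⟨⟨q ++ t, by simp⟩, ?_⟩
    rw [List.append_assoc, List.drop_left]
    exact ⟨t, rfl⟩
  · rintro ⟨⟨y, rfl⟩, hq⟩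
    rw [List.drop_left] at hq
    obtain ⟨t, rfl⟩ := hq
    exact ⟨t, by simp⟩

-- two patterns with different first characters cannot both match
lemma sw_head_ne (x : List Char) (a b : Char) (p q : List Char) (hne : a ≠ b)
    (h : PySem.Chars.startswith x (a :: p) = true) :
    PySem.Chars.startswith x (b :: q) = false := by
  rw [PySem.Chars.startswith_iff] at h
  cases x with
  | nil => simp at h
  | cons c xs =>
    rw [List.cons_prefix_cons] at h
    rw [Bool.eq_false_iff, Ne, PySem.Chars.startswith_iff, List.cons_prefix_cons]
    rintro ⟨rfl, -⟩
    exact hne h.1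

lemma nat_core_eq (al sl : List Char) :
    natA_loop al sl
      [("and he ".toList, "and ".toList), ("and it ".toList, "and ".toList),
       ("he ".toList, "".toList), ("it ".toList, "".toList),
       ("they ".toList, "".toList), ("and they ".toList, "and ".toList)]
    = (let conj := PySem.Chars.startswith al "and ".toList
       let body := if conj then al.drop 4 else al
       natB_loop conj body al sl ["he ".toList, "it ".toList, "they ".toList]) := by
  have e1 : ("and he ".toList : List Char) = "and ".toList ++ "he ".toList := by decide
  have e2 : ("and it ".toList : List Char) = "and ".toList ++ "it ".toList := by decide
  have e3 : ("and they ".toList : List Char) = "and ".toList ++ "they ".toList := by decide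
  by_cases hc : PySem.Chars.startswith al "and ".toList = true
  · -- conjunction present: the three plain-pronoun rows of A's table never fire
    have hhe : PySem.Chars.startswith al "he ".toList = false := by
      have := sw_head_ne al 'a' 'h' "nd ".toList "e ".toList (by decide)
      exact this (by simpa using hc)
    have hit : PySem.Chars.startswith al "it ".toList = false := by
      have := sw_head_ne al 'a' 'i' "nd ".toList "t ".toList (by decide)
      exact this (by simpa using hc)
    have hth : PySem.Chars.startswith al "they ".toList = false := by
      have := sw_head_ne al 'a' 't' "nd ".toList "hey ".toList (by decide)
      exact this (by simpa using hc)
    simp only [natA_loop, natB_loop, e1, e2, e3, sw_append, hc, hhe, hit, hth,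
      Bool.true_and]
    simp [List.drop_drop]
  · -- no conjunction: A's three "and …" rows never fire and body = al
    have hb := Bool.eq_false_iff.mpr hc
    simp only [natA_loop, natB_loop, e1, e2, e3, sw_append, hb, Bool.false_and]
    simp

-- ===== VERDICT (by name: the statement is the Claim_ definition above) =====
theorem naturalize_subject_action_spec : Claim_equal_naturalize_subject_action := by
  intro a s _
  unfold Spec_naturalize_subject_action naturalize_subject_action naturalize_subject_action_alt
  rw [nat_core_eq]
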